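-- pv_equiv track=rewrite | github.com/PiresTiago/FP | Palavra GURU Multijogador/guruMP.py | conjunto_palavras_para_cadeia
-- ===== SOURCE A (Python) =====
-- def conjunto_palavras_para_cadeia(c):
--     '''conjunto_palavras -> cad. caracteres'''
--     if c == []:               #\
--         return '[]'           # >Casos que sao excepcao
--     elif c == ['']:           #/
--         return '[0->[]]'
--     cadeia='['
--     c=ordenar(c)
--     for n in range(1, len(c[-1])+1):
--         variavel_len=conjunto_palavras_para_cadeia_aux(c,n)
--         if variavel_len != '[]':
--             if n == len(c[-1]):      #se for o ultimo ja nao leva o caracter ';'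
--                 cadeia += str(n) + '->' + str(variavel_len)
--             else:
--                 cadeia += str(n) + '->' + str(variavel_len) + ';'
--     return cadeia +']'
--
-- def conjunto_palavras_para_cadeia_aux(c,n):
--     '''conjunto_palavras x inteiro -> cad. caracteres
--     Funcao auxiliar'''
--     string = ''
--     for elem in c:
--         if  len(elem) == n:
--             if string == '':
--                 string+= elem
--             else:
--                 string += ',' + elem
--     return '[' + string + ']'
--
-- def ordenar(c):
--     '''conjunto -> conjunto
--     Funcao que ordena um conjunto de palavras por ordem crescente
--     do seu tamanho, e para cada tamanho sao ordenadas alfabeticamente'''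
--     sorted(c)
--     c.sort(key=len)
--     return c
-- ===== SOURCE B (Python) =====
-- def conjunto_palavras_para_cadeia(c):
--     '''conjunto_palavras -> cad. caracteres (one grouping pass + dict, no length-range loop)'''
--     if c == []:
--         return '[]'
--     if c == ['']:
--         return '[0->[]]'
--     c.sort(key=len)  # keep A's observable in-place mutation of the argument
--     groups = {}
--     for w in c:
--         if len(w) > 0:
--             groups.setdefault(len(w), []).append(w)
--     parts = [str(n) + '->[' + ','.join(groups[n]) + ']' for n in sorted(groups)]
--     return '[' + ';'.join(parts) + ']'
-- ===== Notes on version B (the rewrite author's own statement) =====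
-- stated objective: faster
-- what changed: Replaces A's loop over every length n in 1..max (each iteration rescanning the whole list to build the group and re-testing the last element) by a single grouping pass into a length->words dict plus one pass over the populated lengths joined with ';'.
import Mathlib
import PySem

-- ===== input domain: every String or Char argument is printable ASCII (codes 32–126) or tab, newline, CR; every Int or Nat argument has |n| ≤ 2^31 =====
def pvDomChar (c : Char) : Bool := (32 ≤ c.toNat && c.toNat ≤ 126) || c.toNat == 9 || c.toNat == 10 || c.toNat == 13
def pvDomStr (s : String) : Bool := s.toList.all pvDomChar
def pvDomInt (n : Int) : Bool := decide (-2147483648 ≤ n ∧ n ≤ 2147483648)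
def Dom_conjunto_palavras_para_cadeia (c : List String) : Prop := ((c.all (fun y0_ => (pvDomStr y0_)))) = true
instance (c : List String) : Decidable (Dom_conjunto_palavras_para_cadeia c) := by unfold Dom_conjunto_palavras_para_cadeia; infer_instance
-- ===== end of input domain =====

-- B replaces A's numeric scan over every length 1..max (each with a full pass over the list) by one
-- grouping pass into a dict plus one pass over the populated lengths (objective: faster, constant/asymptotic
-- mechanism in the number of distinct lengths vs the max length; equivalence is about the RETURN value only —
-- both Pythons also sort the argument in place via c.sort(key=len), an identical side effect).
-- Python str ↔ List Char throughout the ports (exact on the ASCII domain); results wrapped with String.ofList.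

-- ===== PORT A =====
-- aux: builds '[w1,w2,...]' of the words of length n, by A's running-string loop
def conjunto_palavras_para_cadeia_aux (c : List String) (n : Int) : List Char :=
  let string := c.foldl (fun string elem =>
    if PySem.Str.len elem = n then
      if string = [] then string ++ elem.toList
      else string ++ [','] ++ elem.toList
    else string) []
  ['['] ++ string ++ [']']

def conjunto_palavras_para_cadeia (c : List String) : String :=
  if c = [] then "[]"
  else if c = [""] then "[0->[]]"
  else
    -- ordenar: 'sorted(c)' is computed and discarded (no effect on the value); c.sort(key=len) yields:
    let c' := PySem.List.sorted c PySem.Str.len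
    -- c[-1]: c' ≠ [] on this branch, so pyGet? is some and the default is never used
    let last := (PySem.List.pyGet? c' (-1)).getD ""
    let cadeia := (PySem.List.pyRange 1 (PySem.Str.len last + 1)).foldl
      (fun cadeia n =>
        let variavel_len := conjunto_palavras_para_cadeia_aux c' n
        if variavel_len ≠ ['[', ']'] then
          if n = PySem.Str.len last then
            cadeia ++ PySem.Int.toChars n ++ ['-', '>'] ++ variavel_len
          else
            cadeia ++ PySem.Int.toChars n ++ ['-', '>'] ++ variavel_len ++ [';']
        else cadeia) ['[']
    String.ofList (cadeia ++ [']'])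

-- ===== PORT B =====
def conjunto_palavras_para_cadeia_alt (c : List String) : String :=
  if c = [] then "[]"
  else if c = [""] then "[0->[]]"
  else
    let s := PySem.List.sorted c PySem.Str.len   -- c.sort(key=len)
    -- groups.setdefault(len(w), []).append(w)  ≡  modify (len w) [] (· ++ [w])
    let groups : PySem.Dict Int (List String) := s.foldl
      (fun groups w =>
        if 0 < PySem.Str.len w then groups.modify (PySem.Str.len w) [] (· ++ [w]) else groups)
      PySem.Dict.empty
    let parts := (PySem.List.sorted groups.keys (fun k => k)).map (fun n =>
      PySem.Int.toChars n ++ ['-', '>', '['] ++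
        PySem.Chars.join [','] ((groups.getD n []).map String.toList) ++ [']'])
    String.ofList (['['] ++ PySem.Chars.join [';'] parts ++ [']'])

-- ===== PRECONDITION & SPEC =====
def Spec_conjunto_palavras_para_cadeia (c : List String) (out : String) : Prop := out = conjunto_palavras_para_cadeia_alt c
instance (c : List String) (out : String) : Decidable (Spec_conjunto_palavras_para_cadeia c out) := by unfold Spec_conjunto_palavras_para_cadeia; infer_instance

-- ===== CLAIM (what is proved, stated in full; the proofs are below) =====
def Claim_equal_conjunto_palavras_para_cadeia : Prop := ∀ (c : List String), Dom_conjunto_palavras_para_cadeia c → Spec_conjunto_palavras_para_cadeia c (conjunto_palavras_para_cadeia c)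

-- ===== LEMMAS AND PROOFS =====

-- the words of s of length n (become A's group for n and B's dict entry at n)
def pvGrp (s : List String) (n : Int) : List String :=
  s.filter (fun w => decide (PySem.Str.len w = n))

theorem pvGetLastD_eq (s : List String) (h : s ≠ []) : s.getLastD "" = s.getLast h := by
  rw [List.getLastD_eq_getLast?, List.getLast?_eq_some_getLast (h := h)]; rfl

theorem pvGetLastD_mem (s : List String) (h : s ≠ []) : s.getLastD "" ∈ s := by
  rw [pvGetLastD_eq s h]; exact List.getLast_mem h

theorem pvGetLast_neg_one (s : List String) (h : s ≠ []) :
    (PySem.List.pyGet? s (-1)).getD "" = s.getLastD "" := by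
  rw [pvGetLastD_eq s h]
  have hl : 0 < s.length := List.length_pos_iff.2 h
  unfold PySem.List.pyGet? PySem.List.pyIdx?
  split_ifs with h1 h2 h3 <;> try omega
  · have he : (-(-1:Int)).toNat = 1 := by norm_num
    rw [he, Option.bind_some, List.getLast_eq_getElem, List.getElem?_eq_getElem (by omega)]
    rfl

theorem pvPairwise_lt_pyRange (a b : Int) : List.Pairwise (· < ·) (PySem.List.pyRange a b) := by
  rw [PySem.List.pyRange_of_pos a b one_pos]
  exact List.pairwise_lt_range.map _ (by intro i j hij; omega)

-- join sep (x :: ls) unrolled to a flatMap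
theorem pvJoin_cons (sep x : List Char) (ls : List (List Char)) :
    PySem.Chars.join sep (x :: ls) = x ++ ls.flatMap (fun y => sep ++ y) := by
  induction ls generalizing x with
  | nil => simp [PySem.Chars.join_singleton]
  | cons y t ih =>
      rw [PySem.Chars.join_cons_cons, ih y]
      simp

-- A's running-comma loop over nonempty strings is ','.join
theorem pvFold_comma_acc (ls : List String) (acc : List Char) (h : acc ≠ []) :
    ls.foldl (fun string elem =>
      if string = [] then string ++ elem.toList else string ++ [','] ++ elem.toList) acc
    = acc ++ ls.flatMap (fun w => ',' :: w.toList) := by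
  induction ls generalizing acc with
  | nil => simp
  | cons w t ih =>
      simp only [List.foldl_cons, if_neg h]
      rw [ih (acc ++ [','] ++ w.toList) (by simp)]
      simp

theorem pvFold_comma (ls : List String) (h : ∀ w ∈ ls, w.toList ≠ []) :
    ls.foldl (fun string elem =>
      if string = [] then string ++ elem.toList else string ++ [','] ++ elem.toList) []
    = PySem.Chars.join [','] (ls.map String.toList) := by
  cases ls with
  | nil => simp [PySem.Chars.join_nil]
  | cons w t =>
      simp only [List.foldl_cons, List.nil_append, if_true]
      rw [pvFold_comma_acc t w.toList (h w (by simp)), List.map_cons, pvJoin_cons]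
      simp [List.flatMap_def, Function.comp_def]

-- aux characterized, for n ≥ 1
theorem pvAux_eq (s : List String) (n : Int) (hn : 1 ≤ n) :
    conjunto_palavras_para_cadeia_aux s n
    = ['['] ++ PySem.Chars.join [','] ((pvGrp s n).map String.toList) ++ [']'] := by
  unfold conjunto_palavras_para_cadeia_aux
  rw [PySem.List.foldl_ite_eq_foldl_filter (p := fun elem => PySem.Str.len elem = n)]
  rw [pvFold_comma]
  · rfl
  · intro w hw
    rw [List.mem_filter] at hw
    have := of_decide_eq_true hw.2
    rw [PySem.Str.len_eq] at this
    intro hnil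
    rw [hnil] at this
    simp at this
    omega

theorem pvAux_ne_iff (s : List String) (n : Int) (hn : 1 ≤ n) :
    conjunto_palavras_para_cadeia_aux s n ≠ ['[', ']'] ↔ pvGrp s n ≠ [] := by
  rw [pvAux_eq s n hn]
  constructor
  · intro h hg; apply h; rw [hg]; simp [PySem.Chars.join_nil]
  · intro hg h
    cases hgr : pvGrp s n with
    | nil => exact hg hgr
    | cons w t =>
        rw [hgr, List.map_cons, pvJoin_cons] at h
        have hw : w ∈ pvGrp s n := by rw [hgr]; simp
        simp only [pvGrp, List.mem_filter] at hw
        have := of_decide_eq_true hw.2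
        rw [PySem.Str.len_eq] at this
        have hwne : w.toList ≠ [] := by
          intro hnil; rw [hnil] at this; simp at this; omega
        cases hcl : w.toList with
        | nil => exact hwne hcl
        | cons a b =>
            rw [hcl] at h
            simp at h

-- every word of a len-sorted nonempty list has length ≤ the last word's length
theorem pvLast_max (c : List String) (h : PySem.List.sorted c PySem.Str.len ≠ []) :
    ∀ w ∈ PySem.List.sorted c PySem.Str.len,
      PySem.Str.len w ≤ PySem.Str.len ((PySem.List.sorted c PySem.Str.len).getLastD "") := by
  intro w hw
  obtain ⟨i, hi, hiw⟩ := List.mem_iff_getElem.1 hw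
  rw [pvGetLastD_eq _ h, List.getLast_eq_getElem, ← hiw]
  exact PySem.List.key_sorted_getElem_mono c PySem.Str.len (by omega) (by omega)

-- the trailing-separator flatMap is ';'.join when the unique maximal element closes the list
theorem pvFlatMap_sep (item : Int → List Char) (L : Int) (ms : List Int)
    (hp : List.Pairwise (· < ·) ms) (hb : ∀ n ∈ ms, n ≤ L) (hm : L ∈ ms) :
    ms.flatMap (fun n => item n ++ if n = L then [] else [';'])
    = PySem.Chars.join [';'] (ms.map item) := by
  induction ms with
  | nil => cases hm
  | cons n t ih =>
      cases t with
      | nil =>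
          have : n = L := by have : L = n := by simpa using hm
                             omega
          simp [this, PySem.Chars.join_singleton]
      | cons m r =>
          have hnm : n < m := (List.pairwise_cons.1 hp).1 m (by simp)
          have hmL : m ≤ L := hb m (by simp)
          have hnL : n ≠ L := by omega
          have hm' : L ∈ m :: r := by
            cases List.mem_cons.1 hm with
            | inl h => omega
            | inr h => exact h
          rw [List.flatMap_cons, List.map_cons, pvJoin_cons]
          rw [ih (List.pairwise_cons.1 hp).2 (fun x hx => hb x (List.mem_cons_of_mem _ hx)) hm']
          rw [List.map_cons, pvJoin_cons]
          simp [if_neg hnL, List.flatMap_def]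

-- B's dict entry at n (n ≥ 1) is exactly the group of words of length n
theorem pvGroups_getD (s : List String) (n : Int) (hn : 1 ≤ n) :
    (s.foldl (fun groups w =>
        if 0 < PySem.Str.len w then groups.modify (PySem.Str.len w) [] (· ++ [w]) else groups)
      (PySem.Dict.empty : PySem.Dict Int (List String))).getD n []
    = pvGrp s n := by
  rw [PySem.List.foldl_ite_eq_foldl_filter (p := fun w => 0 < PySem.Str.len w)]
  have hmap := List.foldl_map (f := fun w : String => (PySem.Str.len w, w))
    (g := fun (d : PySem.Dict Int (List String)) (p : Int × String) => d.modify p.1 [] (· ++ [p.2]))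
    (l := s.filter (fun w => decide (0 < PySem.Str.len w))) (init := PySem.Dict.empty)
  rw [show (fun (groups : PySem.Dict Int (List String)) (w : String) =>
        groups.modify (PySem.Str.len w) [] (· ++ [w]))
      = (fun groups w => (fun (d : PySem.Dict Int (List String)) (p : Int × String) =>
          d.modify p.1 [] (· ++ [p.2])) groups ((fun w => (PySem.Str.len w, w)) w)) from rfl,
    ← hmap, PySem.Dict.getD_foldl_modify_append, List.filter_map, List.map_map]
  simp only [Function.comp_def, PySem.Dict.getD_empty, List.nil_append, List.filter_filter]
  unfold pvGrp
  rw [List.map_id']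
  apply List.filter_congr
  intro w _
  by_cases hln : PySem.Str.len w = n
  · rw [hln]; simp [show (0 : Int) < n from by omega]
  · rw [show (PySem.Str.len w = n) = ((w.toList.length : Int) = n) from by rw [PySem.Str.len_eq]] at hln
    rw [String.length_toList] at hln
    simp [hln]

theorem pvGroups_keys (s : List String) :
    (s.foldl (fun groups w =>
        if 0 < PySem.Str.len w then groups.modify (PySem.Str.len w) [] (· ++ [w]) else groups)
      (PySem.Dict.empty : PySem.Dict Int (List String))).keys
    = PySem.Set.ofList ((s.filter (fun w => decide (0 < PySem.Str.len w))).map PySem.Str.len) := by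
  rw [PySem.List.foldl_ite_eq_foldl_filter (p := fun w => 0 < PySem.Str.len w)]
  rw [PySem.Dict.keys_foldl_modify_key _ PySem.Str.len [] (fun _ w v => v ++ [w])]
  rw [PySem.Dict.keys_empty]
  exact PySem.Set.update_empty _

theorem pvMain (c : List String) :
    conjunto_palavras_para_cadeia c = conjunto_palavras_para_cadeia_alt c := by
  unfold conjunto_palavras_para_cadeia conjunto_palavras_para_cadeia_alt
  by_cases h1 : c = []
  · simp [h1]
  by_cases h2 : c = [""]
  · simp [h2]
  simp only [if_neg h1, if_neg h2]
  have hsne : PySem.List.sorted c PySem.Str.len ≠ [] := by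
    rw [Ne, PySem.List.sorted_eq_nil_iff]; exact h1
  have hmax := pvLast_max c hsne
  rw [pvGetLast_neg_one _ hsne]
  set s := PySem.List.sorted c PySem.Str.len with hs
  set L := PySem.Str.len (s.getLastD "") with hL
  rw [PySem.List.foldl_ite_eq_foldl_filter
      (p := fun n => conjunto_palavras_para_cadeia_aux s n ≠ ['[', ']'])
      (f := fun cadeia n =>
        if n = L then
          cadeia ++ PySem.Int.toChars n ++ ['-', '>'] ++ conjunto_palavras_para_cadeia_aux s n
        else
          cadeia ++ PySem.Int.toChars n ++ ['-', '>'] ++ conjunto_palavras_para_cadeia_aux s n ++ [';'])]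
  rw [PySem.List.foldl_congr_mem
      (f := fun cadeia n =>
        if n = L then
          cadeia ++ PySem.Int.toChars n ++ ['-', '>'] ++ conjunto_palavras_para_cadeia_aux s n
        else
          cadeia ++ PySem.Int.toChars n ++ ['-', '>'] ++ conjunto_palavras_para_cadeia_aux s n ++ [';'])
      (l := (PySem.List.pyRange 1 (L + 1)).filter
        (fun x => decide (conjunto_palavras_para_cadeia_aux s x ≠ ['[', ']'])))
      (init := ['['])
      (g := fun cadeia n => cadeia ++ (PySem.Int.toChars n ++ ['-', '>'] ++ conjunto_palavras_para_cadeia_aux s n ++ (if n = L then [] else [';'])))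
      (by
        intro cad n _
        by_cases h : n = L <;> simp [h, List.append_assoc])]
  rw [PySem.List.foldl_append_eq_flatMap]
  rw [pvGroups_keys]
  set ms := (PySem.List.pyRange 1 (L + 1)).filter
      (fun n => decide (conjunto_palavras_para_cadeia_aux s n ≠ ['[', ']'])) with hms
  have hpw : List.Pairwise (· < ·) ms :=
    (pvPairwise_lt_pyRange 1 (L + 1)).filter _
  have hmem : ∀ a : Int, a ∈ ms ↔ a ∈ PySem.Set.ofList
      ((s.filter (fun w => decide (0 < PySem.Str.len w))).map PySem.Str.len) := by
    intro a
    rw [PySem.Set.mem_ofList, hms, List.mem_filter, PySem.List.mem_pyRange_one]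
    constructor
    · rintro ⟨⟨ha1, _⟩, hp⟩
      have hne := (pvAux_ne_iff s a ha1).1 (of_decide_eq_true hp)
      obtain ⟨w, hw⟩ := List.exists_mem_of_ne_nil _ hne
      simp only [pvGrp, List.mem_filter] at hw
      have hwl := of_decide_eq_true hw.2
      exact List.mem_map.2 ⟨w, List.mem_filter.2 ⟨hw.1, by
        rw [hwl]; exact decide_eq_true (by omega)⟩, hwl⟩
    · intro hmem
      obtain ⟨w, hwf, hwl⟩ := List.mem_map.1 hmem
      rw [List.mem_filter] at hwf
      have h0 := of_decide_eq_true hwf.2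
      have ha1 : 1 ≤ a := by omega
      have haL : a ≤ L := hwl ▸ hmax w hwf.1
      refine ⟨⟨ha1, by omega⟩, decide_eq_true ?_⟩
      exact (pvAux_ne_iff s a ha1).2 (by
        intro hg
        have : w ∈ pvGrp s a := by
          simp only [pvGrp, List.mem_filter]
          exact ⟨hwf.1, decide_eq_true hwl⟩
        rw [hg] at this
        cases this)
  have hns : PySem.List.sorted
      (PySem.Set.ofList ((s.filter (fun w => decide (0 < PySem.Str.len w))).map PySem.Str.len))
      (fun k => k) = ms := by
    apply PySem.List.sorted_eq_of_perm_of_pairwise_lt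
    · exact (List.perm_ext_iff_of_nodup (hpw.imp (fun h => ne_of_lt h))
        (PySem.Set.nodup_ofList _)).2 hmem
    · exact hpw
  rw [hns]
  rw [List.map_congr_left (g := fun n =>
        PySem.Int.toChars n ++ ['-', '>'] ++ conjunto_palavras_para_cadeia_aux s n)
      (by
        intro n hn
        have hn1 : 1 ≤ n := by
          rw [hms, List.mem_filter, PySem.List.mem_pyRange_one] at hn
          exact hn.1.1
        beta_reduce
        rw [pvGroups_getD s n hn1, pvAux_eq s n hn1]
        simp)]
  by_cases hL1 : 1 ≤ L
  · have hlast_mem : L ∈ ms := by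
      rw [hms, List.mem_filter, PySem.List.mem_pyRange_one]
      refine ⟨⟨hL1, by omega⟩, decide_eq_true ?_⟩
      refine (pvAux_ne_iff s L hL1).2 ?_
      have : s.getLastD "" ∈ pvGrp s L := by
        simp only [pvGrp, List.mem_filter]
        exact ⟨pvGetLastD_mem s hsne, by simp [hL]⟩
      intro hg
      rw [hg] at this
      cases this
    rw [pvFlatMap_sep (fun n =>
        PySem.Int.toChars n ++ ['-', '>'] ++ conjunto_palavras_para_cadeia_aux s n) L ms hpw
        (fun n hn => by
          rw [hms, List.mem_filter, PySem.List.mem_pyRange_one] at hn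
          omega) hlast_mem]
  · have hrange : PySem.List.pyRange 1 (L + 1) = [] := by
      rw [PySem.List.pyRange_of_pos _ _ one_pos]
      simp [show ¬ (1 : Int) < L + 1 from by omega]
    have : ms = [] := by rw [hms, hrange]; rfl
    rw [this]
    simp [PySem.Chars.join_nil]

-- ===== VERDICT (by name: the statement is the Claim_ definition above) =====
theorem conjunto_palavras_para_cadeia_spec : Claim_equal_conjunto_palavras_para_cadeia := by
  intro c _
  exact pvMain c
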